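-- pv_equiv track=rewrite | github.com/jaeaster/RamseyCloud | client/MatrixIterator.py | clique_counter
-- ===== SOURCE A (Python) =====
-- def clique_counter(g):
--     count5 = 0
--     count6 = 0
--     count7 = 0
--     count8 = 0
--     count9 = 0
--     count10 = 0
--     sgsize = 10
--     newsize = len(g)-sgsize
--
--     ten_cliques = []
--     for i in range(newsize + 1):
--         for j in range(i + 1, newsize + 2):
--             for k in range(j + 1, newsize + 3):
--                 i_to_j = g[i][j]
--                 i_to = g[i]
--                 j_to = g[j]
--                 if (i_to_j == i_to[k]) and (i_to_j == j_to[k]):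
--                     for l in range(k + 1, newsize + 4):
--                         k_to = g[k]
--                         if (i_to_j == i_to[l]) and (
--                                     i_to_j == j_to[l]) and (
--                                     i_to_j == k_to[l]):
--                             l_to = g[l]
--                             #print ([i, j, k, l])
--                             for m in range(l + 1, newsize + 5):
--                                 if (i_to_j == i_to[m]) and (
--                                             i_to_j == j_to[m]) and (
--                                             i_to_j == k_to[m]) and (
--                                             i_to_j == l_to[m]):
--                                     m_to = g[m]
--                                     count5 += 1
--                                     #print ([i, j, k, l, m])
--                                     for n in range(m + 1, newsize + 6):
--                                         if (i_to_j == i_to[n]) and (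
--                                                     i_to_j == j_to[n]) and (
--                                                     i_to_j == k_to[n]) and (
--                                                     i_to_j == l_to[n]) and (
--                                                     i_to_j == m_to[n]):
--                                             n_to = g[n]
--                                             count6 += 1
--                                             for o in range(n + 1, newsize + 7):
--                                                 if (i_to_j == i_to[o]) and (
--                                                             i_to_j == j_to[o]) and (
--                                                             i_to_j == k_to[o]) and (
--                                                             i_to_j == l_to[o]) and (
--                                                             i_to_j == m_to[o]) and (
--                                                             i_to_j == n_to[o]):
--                                                     o_to = g[o]
--                                                     count7 += 1
--                                                     for p in range(o + 1, newsize + 8):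
--                                                         if (i_to_j == i_to[p]) and (
--                                                                     i_to_j == j_to[p]) and (
--                                                                     i_to_j == k_to[p]) and (
--                                                                     i_to_j == l_to[p]) and (
--                                                                     i_to_j == m_to[p]) and (
--                                                                     i_to_j == n_to[p]) and (
--                                                                     i_to_j == o_to[p]):
--                                                             p_to = g[p]
--                                                             count8 += 1
--                                                             for q in range(p + 1, newsize + 9):
--                                                                 if (i_to_j == i_to[q]) and (
--                                                                             i_to_j == j_to[q]) and (
--                                                                             i_to_j == k_to[q]) and (
--                                                                             i_to_j == l_to[q]) and (
--                                                                             i_to_j == m_to[q]) and (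
--                                                                             i_to_j == n_to[q]) and (
--                                                                             i_to_j == o_to[q]) and (
--                                                                             i_to_j == p_to[q]):
--                                                                     q_to = g[q]
--                                                                     count9 += 1
--                                                                     for r in range(q + 1, newsize + 10):
--                                                                         if (i_to_j == i_to[r]) and (
--                                                                                     i_to_j == j_to[r]) and (
--                                                                                     i_to_j == k_to[r]) and (
--                                                                                     i_to_j == l_to[r]) and (
--                                                                                     i_to_j == m_to[r]) and (
--                                                                                     i_to_j == n_to[r]) and (
--                                                                                     i_to_j == o_to[r]) and (
--                                                                                     i_to_j == p_to[r]) and (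
--                                                                                     i_to_j == q_to[r]):
--                                                                             count10 += 1
--                                                                             ten_cliques.append(
--                                                                                 [i_to_j, i, j, k, l, m, n, o, p, q, r])
--     return count5, count6, count7, count8, count9, count10, ten_cliques
-- ===== SOURCE B (Python) =====
-- def clique_counter(g):
--     n = len(g)
--     ns = n - 10
--     counts = [0, 0, 0, 0, 0, 0]
--     tens = []
--
--     def extend(color, clique, need, cand):
--         # need = 10 - len(clique) vertices still to add;
--         # cand: ascending candidates, adjacent in `color` to every clique member
--         size = 10 - need
--         limit = ns + size + 1
--         while cand:
--             v, cand = cand[0], cand[1:]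
--             if v >= limit:
--                 break
--             if size + 1 < 10:
--                 if size + 1 >= 5:
--                     counts[size + 1 - 5] += 1
--                 extend(color, clique + [v], need - 1,
--                        [w for w in cand if g[v][w] == color])
--             else:
--                 counts[5] += 1
--                 tens.append([color] + clique + [v])
--
--     for i in range(ns + 1):
--         for j in range(i + 1, ns + 2):
--             color = g[i][j]
--             cand = [v for v in range(j + 1, n)
--                     if g[i][v] == color and g[j][v] == color]
--             extend(color, [i, j], 8, cand)
--     return counts[0], counts[1], counts[2], counts[3], counts[4], counts[5], tens
-- ===== Notes on version B (the rewrite author's own statement) =====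
-- stated objective: alternative
-- what changed: A's ten nested loops recheck the colour of the edge to every previously chosen vertex at each level; B grows the clique with one uniform recursive extend step that maintains an ascending candidate list, intersecting it once per accepted vertex with that vertex's same-colour row, so each level scans only surviving candidates and checks a single edge.
import Mathlib
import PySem

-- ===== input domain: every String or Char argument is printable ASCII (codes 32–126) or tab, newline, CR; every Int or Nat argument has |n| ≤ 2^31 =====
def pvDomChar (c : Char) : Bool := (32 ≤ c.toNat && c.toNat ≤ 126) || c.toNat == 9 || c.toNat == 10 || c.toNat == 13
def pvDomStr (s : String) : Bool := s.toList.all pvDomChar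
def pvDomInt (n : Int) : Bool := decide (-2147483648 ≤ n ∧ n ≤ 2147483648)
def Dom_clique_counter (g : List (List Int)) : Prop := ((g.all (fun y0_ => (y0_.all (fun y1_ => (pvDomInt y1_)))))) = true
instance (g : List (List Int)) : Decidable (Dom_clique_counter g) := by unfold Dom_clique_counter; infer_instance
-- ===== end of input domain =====

-- B replaces A's per-level recheck of every previously chosen vertex (over per-level index ranges)
-- by one uniform recursive extension that intersects an incrementally maintained candidate list with
-- the new vertex's same-colour row; objective: alternative (same asymptotics, no redundant rechecks).

-- ===== PORT A =====
-- A-side helpers: row access g[u] and element access row[x] (in range under Pre_).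
def pvRow (g : List (List Int)) (u : Int) : List Int := (PySem.List.pyGet? g u).getD []
def pvEd (r : List Int) (x : Int) : Int := (PySem.List.pyGet? r x).getD 0

-- innermost loop over r (appends 10-cliques)
def aLoopR (c ns : Int) (iTo jTo kTo lTo mTo nTo oTo pTo qTo : List Int)
    (i j k l m n o p q : Int) (s : Int × Int × Int × Int × Int × Int × List (List Int)) :
    Int × Int × Int × Int × Int × Int × List (List Int) :=
  (PySem.List.pyRange (q+1) (ns+10) 1).foldl (fun s r =>
    if c == pvEd iTo r && (c == pvEd jTo r && (c == pvEd kTo r && (c == pvEd lTo r &&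
       (c == pvEd mTo r && (c == pvEd nTo r && (c == pvEd oTo r && (c == pvEd pTo r &&
       c == pvEd qTo r))))))) then
      match s with
      | (c5, c6, c7, c8, c9, c10, tens) =>
          (c5, c6, c7, c8, c9, c10 + 1, tens ++ [[c, i, j, k, l, m, n, o, p, q, r]])
    else s) s

def aLoopQ (g : List (List Int)) (c ns : Int) (iTo jTo kTo lTo mTo nTo oTo pTo : List Int)
    (i j k l m n o p : Int) (s : Int × Int × Int × Int × Int × Int × List (List Int)) :
    Int × Int × Int × Int × Int × Int × List (List Int) :=
  (PySem.List.pyRange (p+1) (ns+9) 1).foldl (fun s q =>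
    if c == pvEd iTo q && (c == pvEd jTo q && (c == pvEd kTo q && (c == pvEd lTo q &&
       (c == pvEd mTo q && (c == pvEd nTo q && (c == pvEd oTo q && c == pvEd pTo q)))))) then
      let qTo := pvRow g q
      match s with
      | (c5, c6, c7, c8, c9, c10, tens) =>
          aLoopR c ns iTo jTo kTo lTo mTo nTo oTo pTo qTo i j k l m n o p q
            (c5, c6, c7, c8, c9 + 1, c10, tens)
    else s) s

def aLoopP (g : List (List Int)) (c ns : Int) (iTo jTo kTo lTo mTo nTo oTo : List Int)
    (i j k l m n o : Int) (s : Int × Int × Int × Int × Int × Int × List (List Int)) :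
    Int × Int × Int × Int × Int × Int × List (List Int) :=
  (PySem.List.pyRange (o+1) (ns+8) 1).foldl (fun s p =>
    if c == pvEd iTo p && (c == pvEd jTo p && (c == pvEd kTo p && (c == pvEd lTo p &&
       (c == pvEd mTo p && (c == pvEd nTo p && c == pvEd oTo p))))) then
      let pTo := pvRow g p
      match s with
      | (c5, c6, c7, c8, c9, c10, tens) =>
          aLoopQ g c ns iTo jTo kTo lTo mTo nTo oTo pTo i j k l m n o p
            (c5, c6, c7, c8 + 1, c9, c10, tens)
    else s) s

def aLoopO (g : List (List Int)) (c ns : Int) (iTo jTo kTo lTo mTo nTo : List Int)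
    (i j k l m n : Int) (s : Int × Int × Int × Int × Int × Int × List (List Int)) :
    Int × Int × Int × Int × Int × Int × List (List Int) :=
  (PySem.List.pyRange (n+1) (ns+7) 1).foldl (fun s o =>
    if c == pvEd iTo o && (c == pvEd jTo o && (c == pvEd kTo o && (c == pvEd lTo o &&
       (c == pvEd mTo o && c == pvEd nTo o)))) then
      let oTo := pvRow g o
      match s with
      | (c5, c6, c7, c8, c9, c10, tens) =>
          aLoopP g c ns iTo jTo kTo lTo mTo nTo oTo i j k l m n o
            (c5, c6, c7 + 1, c8, c9, c10, tens)
    else s) s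

def aLoopN (g : List (List Int)) (c ns : Int) (iTo jTo kTo lTo mTo : List Int)
    (i j k l m : Int) (s : Int × Int × Int × Int × Int × Int × List (List Int)) :
    Int × Int × Int × Int × Int × Int × List (List Int) :=
  (PySem.List.pyRange (m+1) (ns+6) 1).foldl (fun s n =>
    if c == pvEd iTo n && (c == pvEd jTo n && (c == pvEd kTo n && (c == pvEd lTo n &&
       c == pvEd mTo n))) then
      let nTo := pvRow g n
      match s with
      | (c5, c6, c7, c8, c9, c10, tens) =>
          aLoopO g c ns iTo jTo kTo lTo mTo nTo i j k l m n
            (c5, c6 + 1, c7, c8, c9, c10, tens)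
    else s) s

def aLoopM (g : List (List Int)) (c ns : Int) (iTo jTo kTo lTo : List Int)
    (i j k l : Int) (s : Int × Int × Int × Int × Int × Int × List (List Int)) :
    Int × Int × Int × Int × Int × Int × List (List Int) :=
  (PySem.List.pyRange (l+1) (ns+5) 1).foldl (fun s m =>
    if c == pvEd iTo m && (c == pvEd jTo m && (c == pvEd kTo m && c == pvEd lTo m)) then
      let mTo := pvRow g m
      match s with
      | (c5, c6, c7, c8, c9, c10, tens) =>
          aLoopN g c ns iTo jTo kTo lTo mTo i j k l m
            (c5 + 1, c6, c7, c8, c9, c10, tens)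
    else s) s

def aLoopL (g : List (List Int)) (c ns : Int) (iTo jTo : List Int)
    (i j k : Int) (s : Int × Int × Int × Int × Int × Int × List (List Int)) :
    Int × Int × Int × Int × Int × Int × List (List Int) :=
  (PySem.List.pyRange (k+1) (ns+4) 1).foldl (fun s l =>
    let kTo := pvRow g k
    if c == pvEd iTo l && (c == pvEd jTo l && c == pvEd kTo l) then
      let lTo := pvRow g l
      aLoopM g c ns iTo jTo kTo lTo i j k l s
    else s) s

def aLoopK (g : List (List Int)) (ns : Int) (i j : Int)
    (s : Int × Int × Int × Int × Int × Int × List (List Int)) :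
    Int × Int × Int × Int × Int × Int × List (List Int) :=
  (PySem.List.pyRange (j+1) (ns+3) 1).foldl (fun s k =>
    let i_to_j := pvEd (pvRow g i) j
    let iTo := pvRow g i
    let jTo := pvRow g j
    if i_to_j == pvEd iTo k && i_to_j == pvEd jTo k then
      aLoopL g i_to_j ns iTo jTo i j k s
    else s) s

def clique_counter (g : List (List Int)) : Int × Int × Int × Int × Int × Int × List (List Int) :=
  let sgsize : Int := 10
  let newsize : Int := (g.length : Int) - sgsize
  (PySem.List.pyRange 0 (newsize+1) 1).foldl (fun s i =>
    (PySem.List.pyRange (i+1) (newsize+2) 1).foldl (fun s j =>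
      aLoopK g newsize i j s) s) (0, 0, 0, 0, 0, 0, [])

-- ===== PORT B =====
-- B-side helper: g[u][v]
def bEdge (g : List (List Int)) (u v : Int) : Int :=
  (PySem.List.pyGet? ((PySem.List.pyGet? g u).getD []) v).getD 0

-- counts[size+1-5] += 1 (only for clique sizes 5..9; size 10 appends in bLoop)
def bBump (t : Nat) (s : Int × Int × Int × Int × Int × Int × List (List Int)) :
    Int × Int × Int × Int × Int × Int × List (List Int) :=
  match t, s with
  | 5, (c5, c6, c7, c8, c9, c10, tens) => (c5 + 1, c6, c7, c8, c9, c10, tens)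
  | 6, (c5, c6, c7, c8, c9, c10, tens) => (c5, c6 + 1, c7, c8, c9, c10, tens)
  | 7, (c5, c6, c7, c8, c9, c10, tens) => (c5, c6, c7 + 1, c8, c9, c10, tens)
  | 8, (c5, c6, c7, c8, c9, c10, tens) => (c5, c6, c7, c8 + 1, c9, c10, tens)
  | 9, (c5, c6, c7, c8, c9, c10, tens) => (c5, c6, c7, c8, c9 + 1, c10, tens)
  | _, s => s

-- the `while cand:` loop of extend; `deeper` is the recursive call at need-1
def bLoop (g : List (List Int)) (color ns : Int) (size : Nat)
    (deeper : List Int → List Int → (Int × Int × Int × Int × Int × Int × List (List Int)) →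
      Int × Int × Int × Int × Int × Int × List (List Int))
    (clique : List Int) : List Int → (Int × Int × Int × Int × Int × Int × List (List Int)) →
      Int × Int × Int × Int × Int × Int × List (List Int)
  | [], s => s
  | v :: rest, s =>
    if v < ns + ((size : Int) + 1) then
      if size + 1 < 10 then
        bLoop g color ns size deeper clique rest
          (deeper (clique ++ [v]) (rest.filter (fun w => bEdge g v w == color))
            (bBump (size + 1) s))
      else
        bLoop g color ns size deeper clique rest
          (match s with
           | (c5, c6, c7, c8, c9, c10, tens) =>
               (c5, c6, c7, c8, c9, c10 + 1, tens ++ [color :: clique ++ [v]]))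
    else s

-- extend(color, clique, need, cand): structural recursion over need (size = 10 - need)
def bExtendN (g : List (List Int)) (color ns : Int) :
    Nat → List Int → List Int → (Int × Int × Int × Int × Int × Int × List (List Int)) →
      Int × Int × Int × Int × Int × Int × List (List Int)
  | 0, _, _, s => s
  | need + 1, clique, cand, s =>
      bLoop g color ns (9 - need) (bExtendN g color ns need) clique cand s

def clique_counter_alt (g : List (List Int)) : Int × Int × Int × Int × Int × Int × List (List Int) :=
  let n : Int := (g.length : Int)
  let ns : Int := n - 10
  (PySem.List.pyRange 0 (ns+1) 1).foldl (fun s i =>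
    (PySem.List.pyRange (i+1) (ns+2) 1).foldl (fun s j =>
      let color := bEdge g i j
      let cand := (PySem.List.pyRange (j+1) n 1).filter
        (fun v => bEdge g i v == color && bEdge g j v == color)
      bExtendN g color ns 8 [i, j] cand s) s) (0, 0, 0, 0, 0, 0, [])

-- ===== PRECONDITION & SPEC =====
-- Pre_ excludes inputs on which Python A raises IndexError: matrices with at least 10 rows where
-- some row is shorter than the number of rows (A indexes rows at columns up to len(g)-1 once the
-- nested loops run). It also excludes such short-row inputs on which A happens to return because
-- the failing column is never reached; B may read further columns there.
def Pre_clique_counter (g : List (List Int)) : Prop :=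
  g.length < 10 ∨ ∀ r ∈ g, g.length ≤ r.length
instance (g : List (List Int)) : Decidable (Pre_clique_counter g) := by
  unfold Pre_clique_counter; infer_instance

def pvWitness_clique_counter : List (List Int) :=
  [[0,0,0,0,0,0,0,0,0,0],[0,0,0,0,0,0,0,0,0,0],[0,0,0,0,0,0,0,0,0,0],[0,0,0,0,0,0,0,0,0,0],
   [0,0,0,0,0,0,0,0,0,0],[0,0,0,0,0,0,0,0,0,0],[0,0,0,0,0,0,0,0,0,0],[0,0,0,0,0,0,0,0,0,0],
   [0,0,0,0,0,0,0,0,0,0],[0,0,0,0,0,0,0,0,0,0]]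

def Spec_clique_counter (g : List (List Int)) (out : Int × Int × Int × Int × Int × Int × List (List Int)) : Prop := out = clique_counter_alt g
instance (g : List (List Int)) (out : Int × Int × Int × Int × Int × Int × List (List Int)) : Decidable (Spec_clique_counter g out) := by
  unfold Spec_clique_counter
  have d1 : DecidableEq (List (List Int)) := inferInstance
  have d2 : DecidableEq (Int × List (List Int)) := @instDecidableEqProd _ _ _ d1
  have d3 : DecidableEq (Int × Int × List (List Int)) := @instDecidableEqProd _ _ _ d2
  have d4 : DecidableEq (Int × Int × Int × List (List Int)) := @instDecidableEqProd _ _ _ d3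
  have d5 : DecidableEq (Int × Int × Int × Int × List (List Int)) := @instDecidableEqProd _ _ _ d4
  have d6 : DecidableEq (Int × Int × Int × Int × Int × List (List Int)) := @instDecidableEqProd _ _ _ d5
  have d7 : DecidableEq (Int × Int × Int × Int × Int × Int × List (List Int)) := @instDecidableEqProd _ _ _ d6
  exact d7 out (clique_counter_alt g)

-- ===== CLAIM (what is proved, stated in full; the proofs are below) =====
def Claim_equal_clique_counter : Prop := ∀ (g : List (List Int)), Dom_clique_counter g → Pre_clique_counter g → Spec_clique_counter g (clique_counter g)

-- ===== LEMMAS AND PROOFS =====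

-- "x is a same-colour neighbour (in colour c) of every clique member", in A's comparison order
def condAll (g : List (List Int)) (c : Int) (vs : List Int) (x : Int) : Bool :=
  vs.all (fun u => c == bEdge g u x)

lemma pvBeqComm (a b : Int) : (a == b) = (b == a) := by
  by_cases h : a = b <;> simp [h, Ne.symm]

lemma bLoop_stop (g : List (List Int)) (c ns : Int) (size : Nat) (deeper) (clique : List Int)
    (cand : List Int) (s : Int × Int × Int × Int × Int × Int × List (List Int))
    (h : ∀ v ∈ cand, ns + ((size : Int) + 1) ≤ v) :
    bLoop g c ns size deeper clique cand s = s := by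
  cases cand with
  | nil => rfl
  | cons v rest =>
    rw [bLoop, if_neg (by have := h v (List.mem_cons_self ..); omega)]

-- main invariant: bLoop on the condAll-filtered suffix of range(a, len(g)) equals one pass of
-- A-style bounded iteration (fold over range(a, ns+size+1)) whose accepted step calls `deeper` the same way
lemma bLoop_eq_fold (g : List (List Int)) (c ns : Int) (hns : ns = (g.length : Int) - 10)
    (size : Nat) (deeper) :
    ∀ (fuel : Nat) (clique : List Int) (a : Int)
      (s : Int × Int × Int × Int × Int × Int × List (List Int)),
      2 ≤ size → size ≤ 9 → a ≤ ns + ((size : Int) + 1) →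
      (((g.length : Int)) - a).toNat ≤ fuel →
      bLoop g c ns size deeper clique
          (((PySem.List.pyRange a (g.length : Int) 1)).filter (condAll g c clique)) s
        = (PySem.List.pyRange a (ns + ((size : Int) + 1)) 1).foldl
            (fun s v => if condAll g c clique v then
                (if size + 1 < 10 then
                   deeper (clique ++ [v])
                     ((PySem.List.pyRange (v+1) (g.length : Int) 1).filter
                        (condAll g c (clique ++ [v])))
                     (bBump (size + 1) s)
                 else
                   match s with
                   | (c5, c6, c7, c8, c9, c10, tens) =>
                       (c5, c6, c7, c8, c9, c10 + 1, tens ++ [c :: clique ++ [v]]))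
              else s) s := by
  intro fuel
  induction fuel with
  | zero =>
    intro clique a s h2 h9 ha hf
    have hN : (g.length : Int) ≤ a := by omega
    have hlim : ns + ((size : Int) + 1) ≤ (g.length : Int) := by omega
    rw [PySem.List.pyRange_one_eq_nil hN, PySem.List.pyRange_one_eq_nil (by omega)]
    simp [bLoop]
  | succ f ih =>
    intro clique a s h2 h9 ha hf
    by_cases hb : a < ns + ((size : Int) + 1)
    · have haN : a < (g.length : Int) := by omega
      rw [PySem.List.pyRange_one_cons haN, PySem.List.pyRange_one_cons hb]
      by_cases hc : condAll g c clique a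
      · rw [List.filter_cons_of_pos hc]
        rw [bLoop]
        rw [if_pos hb]
        simp only [List.foldl_cons, if_pos hc]
        by_cases hs : size + 1 < 10
        · rw [if_pos hs, if_pos hs]
          have hfil : (((PySem.List.pyRange (a+1) (g.length : Int) 1)).filter
              (condAll g c clique)).filter (fun w => bEdge g a w == c)
              = ((PySem.List.pyRange (a+1) (g.length : Int) 1)).filter
                  (condAll g c (clique ++ [a])) := by
            rw [List.filter_filter]
            apply List.filter_congr
            intro x _
            simp [condAll, List.all_append, pvBeqComm, Bool.and_comm]
          rw [hfil]
          exact ih clique (a+1) _ h2 h9 (by omega) (by omega)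
        · rw [if_neg hs, if_neg hs]
          exact ih clique (a+1) _ h2 h9 (by omega) (by omega)
      · rw [List.filter_cons_of_neg hc]
        simp only [List.foldl_cons, if_neg hc]
        exact ih clique (a+1) s h2 h9 (by omega) (by omega)
    · have hab : ns + ((size : Int) + 1) ≤ a := by omega
      rw [PySem.List.pyRange_one_eq_nil (a := a) (b := ns + ((size : Int) + 1)) hab]
      simp only [List.foldl_nil]
      apply bLoop_stop
      intro v hv
      have := (PySem.List.mem_pyRange_one.mp (List.mem_of_mem_filter hv)).1
      omega

lemma bridgeR (g : List (List Int)) (c ns : Int) (hns : ns = (g.length : Int) - 10)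
    (i j k l m n o p q : Int) (s : Int × Int × Int × Int × Int × Int × List (List Int))
    (hq : q + 1 ≤ ns + 10) :
    bExtendN g c ns 1 [i, j, k, l, m, n, o, p, q]
        (((PySem.List.pyRange (q+1) (g.length : Int) 1)).filter
          (condAll g c [i, j, k, l, m, n, o, p, q])) s
      = aLoopR c ns (pvRow g i) (pvRow g j) (pvRow g k) (pvRow g l) (pvRow g m) (pvRow g n)
          (pvRow g o) (pvRow g p) (pvRow g q) i j k l m n o p q s := by
  rw [show bExtendN g c ns 1 = bLoop g c ns 9 (bExtendN g c ns 0) from rfl]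
  rw [bLoop_eq_fold g c ns hns 9 (bExtendN g c ns 0) (((g.length : Int)) - (q+1)).toNat _ (q+1) s
       (by omega) (by omega) (by push_cast; omega) (le_refl _)]
  unfold aLoopR
  have hlim : ns + (((9 : Nat) : Int) + 1) = ns + 10 := by push_cast; omega
  rw [hlim]
  apply List.foldl_ext
  intro s v _
  have hcond : condAll g c [i, j, k, l, m, n, o, p, q] v =
      (c == pvEd (pvRow g i) v && (c == pvEd (pvRow g j) v && (c == pvEd (pvRow g k) v &&
       (c == pvEd (pvRow g l) v && (c == pvEd (pvRow g m) v && (c == pvEd (pvRow g n) v &&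
       (c == pvEd (pvRow g o) v && (c == pvEd (pvRow g p) v && c == pvEd (pvRow g q) v)))))))) := by
    simp [condAll, bEdge, pvEd, pvRow]
  rw [hcond]
  rcases s with ⟨c5, c6, c7, c8, c9, c10, tens⟩
  by_cases hc : (c == pvEd (pvRow g i) v && (c == pvEd (pvRow g j) v && (c == pvEd (pvRow g k) v &&
       (c == pvEd (pvRow g l) v && (c == pvEd (pvRow g m) v && (c == pvEd (pvRow g n) v &&
       (c == pvEd (pvRow g o) v && (c == pvEd (pvRow g p) v && c == pvEd (pvRow g q) v)))))))) = true
  · rw [if_pos hc, if_pos hc, if_neg (by omega)]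
    simp
  · rw [if_neg hc, if_neg hc]


lemma bridgeQ (g : List (List Int)) (c ns : Int) (hns : ns = (g.length : Int) - 10)
    (i j k l m n o p : Int) (s : Int × Int × Int × Int × Int × Int × List (List Int))
    (hlast : p + 1 ≤ ns + 9) :
    bExtendN g c ns 2 [i, j, k, l, m, n, o, p]
        (((PySem.List.pyRange (p+1) (g.length : Int) 1)).filter
          (condAll g c [i, j, k, l, m, n, o, p])) s
      = aLoopQ g c ns (pvRow g i) (pvRow g j) (pvRow g k) (pvRow g l) (pvRow g m) (pvRow g n) (pvRow g o) (pvRow g p) i j k l m n o p s := by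
  rw [show bExtendN g c ns 2 = bLoop g c ns 8 (bExtendN g c ns 1) from rfl]
  rw [bLoop_eq_fold g c ns hns 8 (bExtendN g c ns 1) (((g.length : Int)) - (p+1)).toNat _ (p+1) s
       (by omega) (by omega) (by push_cast; omega) (le_refl _)]
  unfold aLoopQ
  have hlim : ns + (((8 : Nat) : Int) + 1) = ns + 9 := by push_cast; omega
  rw [hlim]
  apply List.foldl_ext
  intro s v hv
  have hvlt : v < ns + 9 := (PySem.List.mem_pyRange_one.mp hv).2
  have hcond : condAll g c [i, j, k, l, m, n, o, p] v = (c == pvEd (pvRow g i) v && (c == pvEd (pvRow g j) v && (c == pvEd (pvRow g k) v && (c == pvEd (pvRow g l) v && (c == pvEd (pvRow g m) v && (c == pvEd (pvRow g n) v && (c == pvEd (pvRow g o) v && (c == pvEd (pvRow g p) v)))))))) := by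
    simp [condAll, bEdge, pvEd, pvRow]
  rw [hcond]
  by_cases hc : (c == pvEd (pvRow g i) v && (c == pvEd (pvRow g j) v && (c == pvEd (pvRow g k) v && (c == pvEd (pvRow g l) v && (c == pvEd (pvRow g m) v && (c == pvEd (pvRow g n) v && (c == pvEd (pvRow g o) v && (c == pvEd (pvRow g p) v)))))))) = true
  · rw [if_pos hc, if_pos hc, if_pos (by omega)]
    have happ : [i, j, k, l, m, n, o, p] ++ [v] = [i, j, k, l, m, n, o, p, v] := rfl
    rw [happ, bridgeR g c ns hns i j k l m n o p v _ (by omega)]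
    rcases s with ⟨c5, c6, c7, c8, c9, c10, tens⟩
    rfl
  · rw [if_neg hc, if_neg hc]

lemma bridgeP (g : List (List Int)) (c ns : Int) (hns : ns = (g.length : Int) - 10)
    (i j k l m n o : Int) (s : Int × Int × Int × Int × Int × Int × List (List Int))
    (hlast : o + 1 ≤ ns + 8) :
    bExtendN g c ns 3 [i, j, k, l, m, n, o]
        (((PySem.List.pyRange (o+1) (g.length : Int) 1)).filter
          (condAll g c [i, j, k, l, m, n, o])) s
      = aLoopP g c ns (pvRow g i) (pvRow g j) (pvRow g k) (pvRow g l) (pvRow g m) (pvRow g n) (pvRow g o) i j k l m n o s := by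
  rw [show bExtendN g c ns 3 = bLoop g c ns 7 (bExtendN g c ns 2) from rfl]
  rw [bLoop_eq_fold g c ns hns 7 (bExtendN g c ns 2) (((g.length : Int)) - (o+1)).toNat _ (o+1) s
       (by omega) (by omega) (by push_cast; omega) (le_refl _)]
  unfold aLoopP
  have hlim : ns + (((7 : Nat) : Int) + 1) = ns + 8 := by push_cast; omega
  rw [hlim]
  apply List.foldl_ext
  intro s v hv
  have hvlt : v < ns + 8 := (PySem.List.mem_pyRange_one.mp hv).2
  have hcond : condAll g c [i, j, k, l, m, n, o] v = (c == pvEd (pvRow g i) v && (c == pvEd (pvRow g j) v && (c == pvEd (pvRow g k) v && (c == pvEd (pvRow g l) v && (c == pvEd (pvRow g m) v && (c == pvEd (pvRow g n) v && (c == pvEd (pvRow g o) v))))))) := by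
    simp [condAll, bEdge, pvEd, pvRow]
  rw [hcond]
  by_cases hc : (c == pvEd (pvRow g i) v && (c == pvEd (pvRow g j) v && (c == pvEd (pvRow g k) v && (c == pvEd (pvRow g l) v && (c == pvEd (pvRow g m) v && (c == pvEd (pvRow g n) v && (c == pvEd (pvRow g o) v))))))) = true
  · rw [if_pos hc, if_pos hc, if_pos (by omega)]
    have happ : [i, j, k, l, m, n, o] ++ [v] = [i, j, k, l, m, n, o, v] := rfl
    rw [happ, bridgeQ g c ns hns i j k l m n o v _ (by omega)]
    rcases s with ⟨c5, c6, c7, c8, c9, c10, tens⟩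
    rfl
  · rw [if_neg hc, if_neg hc]

lemma bridgeO (g : List (List Int)) (c ns : Int) (hns : ns = (g.length : Int) - 10)
    (i j k l m n : Int) (s : Int × Int × Int × Int × Int × Int × List (List Int))
    (hlast : n + 1 ≤ ns + 7) :
    bExtendN g c ns 4 [i, j, k, l, m, n]
        (((PySem.List.pyRange (n+1) (g.length : Int) 1)).filter
          (condAll g c [i, j, k, l, m, n])) s
      = aLoopO g c ns (pvRow g i) (pvRow g j) (pvRow g k) (pvRow g l) (pvRow g m) (pvRow g n) i j k l m n s := by
  rw [show bExtendN g c ns 4 = bLoop g c ns 6 (bExtendN g c ns 3) from rfl]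
  rw [bLoop_eq_fold g c ns hns 6 (bExtendN g c ns 3) (((g.length : Int)) - (n+1)).toNat _ (n+1) s
       (by omega) (by omega) (by push_cast; omega) (le_refl _)]
  unfold aLoopO
  have hlim : ns + (((6 : Nat) : Int) + 1) = ns + 7 := by push_cast; omega
  rw [hlim]
  apply List.foldl_ext
  intro s v hv
  have hvlt : v < ns + 7 := (PySem.List.mem_pyRange_one.mp hv).2
  have hcond : condAll g c [i, j, k, l, m, n] v = (c == pvEd (pvRow g i) v && (c == pvEd (pvRow g j) v && (c == pvEd (pvRow g k) v && (c == pvEd (pvRow g l) v && (c == pvEd (pvRow g m) v && (c == pvEd (pvRow g n) v)))))) := by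
    simp [condAll, bEdge, pvEd, pvRow]
  rw [hcond]
  by_cases hc : (c == pvEd (pvRow g i) v && (c == pvEd (pvRow g j) v && (c == pvEd (pvRow g k) v && (c == pvEd (pvRow g l) v && (c == pvEd (pvRow g m) v && (c == pvEd (pvRow g n) v)))))) = true
  · rw [if_pos hc, if_pos hc, if_pos (by omega)]
    have happ : [i, j, k, l, m, n] ++ [v] = [i, j, k, l, m, n, v] := rfl
    rw [happ, bridgeP g c ns hns i j k l m n v _ (by omega)]
    rcases s with ⟨c5, c6, c7, c8, c9, c10, tens⟩
    rfl
  · rw [if_neg hc, if_neg hc]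

lemma bridgeN (g : List (List Int)) (c ns : Int) (hns : ns = (g.length : Int) - 10)
    (i j k l m : Int) (s : Int × Int × Int × Int × Int × Int × List (List Int))
    (hlast : m + 1 ≤ ns + 6) :
    bExtendN g c ns 5 [i, j, k, l, m]
        (((PySem.List.pyRange (m+1) (g.length : Int) 1)).filter
          (condAll g c [i, j, k, l, m])) s
      = aLoopN g c ns (pvRow g i) (pvRow g j) (pvRow g k) (pvRow g l) (pvRow g m) i j k l m s := by
  rw [show bExtendN g c ns 5 = bLoop g c ns 5 (bExtendN g c ns 4) from rfl]
  rw [bLoop_eq_fold g c ns hns 5 (bExtendN g c ns 4) (((g.length : Int)) - (m+1)).toNat _ (m+1) s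
       (by omega) (by omega) (by push_cast; omega) (le_refl _)]
  unfold aLoopN
  have hlim : ns + (((5 : Nat) : Int) + 1) = ns + 6 := by push_cast; omega
  rw [hlim]
  apply List.foldl_ext
  intro s v hv
  have hvlt : v < ns + 6 := (PySem.List.mem_pyRange_one.mp hv).2
  have hcond : condAll g c [i, j, k, l, m] v = (c == pvEd (pvRow g i) v && (c == pvEd (pvRow g j) v && (c == pvEd (pvRow g k) v && (c == pvEd (pvRow g l) v && (c == pvEd (pvRow g m) v))))) := by
    simp [condAll, bEdge, pvEd, pvRow]
  rw [hcond]
  by_cases hc : (c == pvEd (pvRow g i) v && (c == pvEd (pvRow g j) v && (c == pvEd (pvRow g k) v && (c == pvEd (pvRow g l) v && (c == pvEd (pvRow g m) v))))) = true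
  · rw [if_pos hc, if_pos hc, if_pos (by omega)]
    have happ : [i, j, k, l, m] ++ [v] = [i, j, k, l, m, v] := rfl
    rw [happ, bridgeO g c ns hns i j k l m v _ (by omega)]
    rcases s with ⟨c5, c6, c7, c8, c9, c10, tens⟩
    rfl
  · rw [if_neg hc, if_neg hc]

lemma bridgeM (g : List (List Int)) (c ns : Int) (hns : ns = (g.length : Int) - 10)
    (i j k l : Int) (s : Int × Int × Int × Int × Int × Int × List (List Int))
    (hlast : l + 1 ≤ ns + 5) :
    bExtendN g c ns 6 [i, j, k, l]
        (((PySem.List.pyRange (l+1) (g.length : Int) 1)).filter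
          (condAll g c [i, j, k, l])) s
      = aLoopM g c ns (pvRow g i) (pvRow g j) (pvRow g k) (pvRow g l) i j k l s := by
  rw [show bExtendN g c ns 6 = bLoop g c ns 4 (bExtendN g c ns 5) from rfl]
  rw [bLoop_eq_fold g c ns hns 4 (bExtendN g c ns 5) (((g.length : Int)) - (l+1)).toNat _ (l+1) s
       (by omega) (by omega) (by push_cast; omega) (le_refl _)]
  unfold aLoopM
  have hlim : ns + (((4 : Nat) : Int) + 1) = ns + 5 := by push_cast; omega
  rw [hlim]
  apply List.foldl_ext
  intro s v hv
  have hvlt : v < ns + 5 := (PySem.List.mem_pyRange_one.mp hv).2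
  have hcond : condAll g c [i, j, k, l] v = (c == pvEd (pvRow g i) v && (c == pvEd (pvRow g j) v && (c == pvEd (pvRow g k) v && (c == pvEd (pvRow g l) v)))) := by
    simp [condAll, bEdge, pvEd, pvRow]
  rw [hcond]
  by_cases hc : (c == pvEd (pvRow g i) v && (c == pvEd (pvRow g j) v && (c == pvEd (pvRow g k) v && (c == pvEd (pvRow g l) v)))) = true
  · rw [if_pos hc, if_pos hc, if_pos (by omega)]
    have happ : [i, j, k, l] ++ [v] = [i, j, k, l, v] := rfl
    rw [happ, bridgeN g c ns hns i j k l v _ (by omega)]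
    rcases s with ⟨c5, c6, c7, c8, c9, c10, tens⟩
    rfl
  · rw [if_neg hc, if_neg hc]

lemma bridgeL (g : List (List Int)) (c ns : Int) (hns : ns = (g.length : Int) - 10)
    (i j k : Int) (s : Int × Int × Int × Int × Int × Int × List (List Int))
    (hlast : k + 1 ≤ ns + 4) :
    bExtendN g c ns 7 [i, j, k]
        (((PySem.List.pyRange (k+1) (g.length : Int) 1)).filter
          (condAll g c [i, j, k])) s
      = aLoopL g c ns (pvRow g i) (pvRow g j) i j k s := by
  rw [show bExtendN g c ns 7 = bLoop g c ns 3 (bExtendN g c ns 6) from rfl]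
  rw [bLoop_eq_fold g c ns hns 3 (bExtendN g c ns 6) (((g.length : Int)) - (k+1)).toNat _ (k+1) s
       (by omega) (by omega) (by push_cast; omega) (le_refl _)]
  unfold aLoopL
  have hlim : ns + (((3 : Nat) : Int) + 1) = ns + 4 := by push_cast; omega
  rw [hlim]
  apply List.foldl_ext
  intro s v hv
  have hvlt : v < ns + 4 := (PySem.List.mem_pyRange_one.mp hv).2
  have hcond : condAll g c [i, j, k] v =
      (c == pvEd (pvRow g i) v && (c == pvEd (pvRow g j) v && c == pvEd (pvRow g k) v)) := by
    simp [condAll, bEdge, pvEd, pvRow]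
  rw [hcond]
  show _ = (if c == pvEd (pvRow g i) v && (c == pvEd (pvRow g j) v && c == pvEd (pvRow g k) v) then
      aLoopM g c ns (pvRow g i) (pvRow g j) (pvRow g k) (pvRow g v) i j k v s else s)
  by_cases hc : (c == pvEd (pvRow g i) v && (c == pvEd (pvRow g j) v && c == pvEd (pvRow g k) v)) = true
  · rw [if_pos hc, if_pos hc, if_pos (by omega)]
    have happ : [i, j, k] ++ [v] = [i, j, k, v] := rfl
    rw [happ, bridgeM g c ns hns i j k v _ (by omega)]
    rfl
  · rw [if_neg hc, if_neg hc]

lemma bridgeK (g : List (List Int)) (ns : Int) (hns : ns = (g.length : Int) - 10)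
    (i j : Int) (s : Int × Int × Int × Int × Int × Int × List (List Int))
    (hj : j + 1 ≤ ns + 3) :
    bExtendN g (bEdge g i j) ns 8 [i, j]
        (((PySem.List.pyRange (j+1) (g.length : Int) 1)).filter
          (condAll g (bEdge g i j) [i, j])) s
      = aLoopK g ns i j s := by
  rw [show bExtendN g (bEdge g i j) ns 8 = bLoop g (bEdge g i j) ns 2 (bExtendN g (bEdge g i j) ns 7) from rfl]
  rw [bLoop_eq_fold g (bEdge g i j) ns hns 2 (bExtendN g (bEdge g i j) ns 7) (((g.length : Int)) - (j+1)).toNat _ (j+1) s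
       (by omega) (by omega) (by push_cast; omega) (le_refl _)]
  unfold aLoopK
  have hlim : ns + (((2 : Nat) : Int) + 1) = ns + 3 := by push_cast; omega
  rw [hlim]
  apply List.foldl_ext
  intro s v hv
  have hvlt : v < ns + 3 := (PySem.List.mem_pyRange_one.mp hv).2
  have hcond : condAll g (bEdge g i j) [i, j] v =
      (bEdge g i j == pvEd (pvRow g i) v && bEdge g i j == pvEd (pvRow g j) v) := by
    simp [condAll, bEdge, pvEd, pvRow]
  rw [hcond]
  show _ = (if pvEd (pvRow g i) j == pvEd (pvRow g i) v && pvEd (pvRow g i) j == pvEd (pvRow g j) v then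
      aLoopL g (pvEd (pvRow g i) j) ns (pvRow g i) (pvRow g j) i j v s else s)
  have hed : bEdge g i j = pvEd (pvRow g i) j := rfl
  rw [hed]
  by_cases hc : (pvEd (pvRow g i) j == pvEd (pvRow g i) v && pvEd (pvRow g i) j == pvEd (pvRow g j) v) = true
  · rw [if_pos hc, if_pos hc, if_pos (by omega)]
    have happ : [i, j] ++ [v] = [i, j, v] := rfl
    rw [happ, bridgeL g (pvEd (pvRow g i) j) ns hns i j v _ (by omega)]
    rcases s with ⟨c5, c6, c7, c8, c9, c10, tens⟩
    rfl
  · rw [if_neg hc, if_neg hc]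

-- ===== VERDICT (by name: the statement is the Claim_ definition above) =====
theorem clique_counter_spec : Claim_equal_clique_counter := by
  intro g _ _
  unfold Spec_clique_counter clique_counter clique_counter_alt
  apply List.foldl_ext
  intro s i _
  apply List.foldl_ext
  intro s j hj
  have hjlt : j < ((g.length : Int) - 10) + 2 := (PySem.List.mem_pyRange_one.mp hj).2
  have hfil : ((PySem.List.pyRange (j+1) (g.length : Int) 1)).filter
        (fun v => bEdge g i v == bEdge g i j && bEdge g j v == bEdge g i j)
      = ((PySem.List.pyRange (j+1) (g.length : Int) 1)).filter
        (condAll g (bEdge g i j) [i, j]) := by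
    apply List.filter_congr
    intro x _
    simp only [condAll, List.all_cons, List.all_nil, Bool.and_true]
    rw [pvBeqComm (bEdge g i x) (bEdge g i j), pvBeqComm (bEdge g j x) (bEdge g i j)]
  show aLoopK g ((g.length : Int) - 10) i j s
      = bExtendN g (bEdge g i j) ((g.length : Int) - 10) 8 [i, j]
          (((PySem.List.pyRange (j+1) (g.length : Int) 1)).filter
            (fun v => bEdge g i v == bEdge g i j && bEdge g j v == bEdge g i j)) s
  rw [hfil]
  exact (bridgeK g ((g.length : Int) - 10) rfl i j s (by omega)).symm
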